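-- pv_equiv track=rewrite | github.com/cgtygrss/object-measurer | Logic/ImageOperations/MeasureObject.py | get_horizontal_intersection_coords
-- ===== SOURCE A (Python) =====
-- def get_horizontal_intersection_coords(coords, distinct_y_intersections):
--     horizontal_intersection_coords = list()
--     for j in distinct_y_intersections:
--         distinct_y_coords = list()
--         for i in coords:
--             if i not in distinct_y_coords and i[0] == j:
--                 distinct_y_coords.append(i)
--         horizontal_intersection_coords.append(distinct_y_coords)
--     return horizontal_intersection_coords
-- ===== SOURCE B (Python) =====
-- def get_horizontal_intersection_coords(coords, distinct_y_intersections):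
--     groups = {}
--     seen = set()
--     for c in coords:
--         if c not in seen:
--             seen.add(c)
--             groups.setdefault(c[0], []).append(c)
--     return [groups.get(j, []) for j in distinct_y_intersections]
-- ===== Notes on version B (the rewrite author's own statement) =====
-- stated objective: faster
-- what changed: Replaces the nested scan (for each target y, rescan all coords with a list membership test) by a single pass over coords that groups distinct coords into a dict keyed by first component using a set for dedup, then emits the groups in target order.
import Mathlib
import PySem

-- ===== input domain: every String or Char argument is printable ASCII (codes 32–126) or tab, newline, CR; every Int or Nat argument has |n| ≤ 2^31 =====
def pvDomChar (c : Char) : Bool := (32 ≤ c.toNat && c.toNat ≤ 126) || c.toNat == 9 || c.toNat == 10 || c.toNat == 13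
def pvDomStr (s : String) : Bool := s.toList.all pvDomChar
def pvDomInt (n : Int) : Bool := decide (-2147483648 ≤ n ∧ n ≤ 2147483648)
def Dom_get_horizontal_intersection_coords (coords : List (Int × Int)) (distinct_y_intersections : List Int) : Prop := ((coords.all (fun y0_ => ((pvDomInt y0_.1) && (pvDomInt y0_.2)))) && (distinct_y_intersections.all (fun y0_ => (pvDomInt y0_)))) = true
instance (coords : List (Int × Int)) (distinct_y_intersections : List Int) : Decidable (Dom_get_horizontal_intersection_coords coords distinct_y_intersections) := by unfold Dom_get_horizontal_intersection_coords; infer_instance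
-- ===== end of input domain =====

-- B replaces A's per-target rescans of coords by one grouping pass over coords (dict keyed by
-- first component + dedup set), then emits groups in target order; objective: faster.


-- ===== PORT A =====
-- inner loop: 'for i in coords: if i not in distinct_y_coords and i[0] == j: distinct_y_coords.append(i)'
def ghicInner (coords : List (Int × Int)) (j : Int) : List (Int × Int) :=
  coords.foldl (fun acc i => if i ∉ acc ∧ i.1 = j then acc ++ [i] else acc) []

def get_horizontal_intersection_coords (coords : List (Int × Int)) (distinct_y_intersections : List Int) : List (List (Int × Int)) :=
  distinct_y_intersections.foldl (fun h j => h ++ [ghicInner coords j]) []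

-- ===== PORT B =====
-- one pass: 'for c in coords: if c not in seen: seen.add(c); groups.setdefault(c[0], []).append(c)'
def ghicStep (st : PySem.Dict Int (List (Int × Int)) × PySem.Set (Int × Int)) (c : Int × Int) :
    PySem.Dict Int (List (Int × Int)) × PySem.Set (Int × Int) :=
  if PySem.Set.contains st.2 c then st
  else (st.1.modify c.1 [] (fun g => g ++ [c]), PySem.Set.add st.2 c)

def get_horizontal_intersection_coords_alt (coords : List (Int × Int)) (distinct_y_intersections : List Int) : List (List (Int × Int)) :=
  let st := coords.foldl ghicStep (PySem.Dict.empty, PySem.Set.empty)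
  distinct_y_intersections.map (fun j => st.1.getD j [])

-- ===== PRECONDITION & SPEC =====
def Spec_get_horizontal_intersection_coords (coords : List (Int × Int)) (distinct_y_intersections : List Int) (out : List (List (Int × Int))) : Prop := out = get_horizontal_intersection_coords_alt coords distinct_y_intersections
instance (coords : List (Int × Int)) (distinct_y_intersections : List Int) (out : List (List (Int × Int))) : Decidable (Spec_get_horizontal_intersection_coords coords distinct_y_intersections out) := by unfold Spec_get_horizontal_intersection_coords; infer_instance

-- ===== CLAIM (what is proved, stated in full; the proofs are below) =====
def Claim_equal_get_horizontal_intersection_coords : Prop := ∀ (coords : List (Int × Int)) (distinct_y_intersections : List Int), Dom_get_horizontal_intersection_coords coords distinct_y_intersections → Spec_get_horizontal_intersection_coords coords distinct_y_intersections (get_horizontal_intersection_coords coords distinct_y_intersections)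

-- ===== LEMMAS AND PROOFS =====

-- The grouping pass, started from any state whose set and dict agree, computes A's inner loop.
theorem ghic_main (rest : List (Int × Int)) (d : PySem.Dict Int (List (Int × Int)))
    (s : PySem.Set (Int × Int))
    (hmem : ∀ x : Int × Int, PySem.Set.contains s x = true ↔ x ∈ d.getD x.1 [])
    (hkey : ∀ (j : Int) (x : Int × Int), x ∈ d.getD j [] → x.1 = j) (j : Int) :
    (rest.foldl ghicStep (d, s)).1.getD j [] =
      rest.foldl (fun acc i => if i ∉ acc ∧ i.1 = j then acc ++ [i] else acc) (d.getD j []) := by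
  induction rest generalizing d s with
  | nil => simp
  | cons c rest ih =>
    simp only [List.foldl_cons, ghicStep]
    by_cases hc : PySem.Set.contains s c = true
    · rw [if_pos hc]
      have hcin : c ∈ d.getD c.1 [] := (hmem c).1 hc
      have hneg : ¬(c ∉ d.getD j [] ∧ c.1 = j) := by
        rintro ⟨hn, hj⟩; exact hn (hj ▸ hcin)
      rw [if_neg hneg]
      exact ih d s hmem hkey
    · rw [if_neg hc]
      have hcnot : c ∉ d.getD c.1 [] := fun h => hc ((hmem c).2 h)
      have hd' : ∀ j' : Int, (d.modify c.1 [] (fun g => g ++ [c])).getD j' [] =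
          if j' = c.1 then d.getD c.1 [] ++ [c] else d.getD j' [] := by
        intro j'; exact PySem.Dict.getD_modify d c.1 j' [] (fun g => g ++ [c])
      have hmem' : ∀ x : Int × Int, PySem.Set.contains (PySem.Set.add s c) x = true ↔
          x ∈ (d.modify c.1 [] (fun g => g ++ [c])).getD x.1 [] := by
        intro x
        have hsc : PySem.Set.contains (PySem.Set.add s c) x = true ↔ x ∈ s.add c := by
          simp [PySem.Set.contains]
        rw [hsc, PySem.Set.mem_add, hd' x.1]
        by_cases hx : x = c
        · subst hx; simp
        · by_cases hx1 : x.1 = c.1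
          · rw [if_pos hx1]
            constructor
            · rintro (hxs | rfl)
              · exact List.mem_append_left _ (hx1 ▸ (hmem x).1 (by simpa [PySem.Set.contains] using hxs))
              · exact List.mem_append_right _ (List.mem_singleton.mpr rfl)
            · intro hxm
              rcases List.mem_append.mp hxm with h | h
              · exact Or.inl (by simpa [PySem.Set.contains] using (hmem x).2 (hx1 ▸ h))
              · exact absurd (List.mem_singleton.mp h) hx
          · rw [if_neg hx1]
            constructor
            · rintro (hxs | rfl)
              · exact (hmem x).1 (by simpa [PySem.Set.contains] using hxs)
              · exact absurd rfl hx1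
            · intro hxm
              exact Or.inl (by simpa [PySem.Set.contains] using (hmem x).2 hxm)
      have hkey' : ∀ (j' : Int) (x : Int × Int),
          x ∈ (d.modify c.1 [] (fun g => g ++ [c])).getD j' [] → x.1 = j' := by
        intro j' x hx
        rw [hd' j'] at hx
        by_cases hj' : j' = c.1
        · rw [if_pos hj'] at hx
          rcases List.mem_append.mp hx with h | h
          · exact hj' ▸ hkey c.1 x h
          · rw [List.mem_singleton.mp h]; exact hj'.symm
        · rw [if_neg hj'] at hx; exact hkey j' x hx
      rw [ih _ _ hmem' hkey', hd' j]
      by_cases hj : c.1 = j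
      · have : j = c.1 := hj.symm
        rw [if_pos this, if_pos ⟨this ▸ hcnot, hj⟩, this]
      · rw [if_neg (fun h => hj h.symm), if_neg (fun h => hj h.2)]

-- ===== VERDICT (by name: the statement is the Claim_ definition above) =====
theorem get_horizontal_intersection_coords_spec : Claim_equal_get_horizontal_intersection_coords := by
  intro coords ys _
  unfold Spec_get_horizontal_intersection_coords get_horizontal_intersection_coords
    get_horizontal_intersection_coords_alt
  rw [PySem.List.foldl_append_singleton_eq_map]
  simp only [List.nil_append]
  apply List.map_congr_left
  intro j _
  unfold ghicInner
  rw [ghic_main coords PySem.Dict.empty PySem.Set.empty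
    (by intro x; simp [PySem.Set.contains, PySem.Set.empty, PySem.Dict.getD_empty])
    (by intro j' x hx; simp [PySem.Dict.getD_empty] at hx) j]
  simp [PySem.Dict.getD_empty]
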